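-- pv_equiv track=rewrite | github.com/MohsinMalik2/resume-reviewer | backend/app/agents/execution_agent.py | _recommend_escalation_action
-- ===== SOURCE A (Python) =====
-- from typing import Dict, Any, List
--
-- def _recommend_escalation_action(reasons: List[str]) -> str:
--     """Recommend action for escalated case"""
--     if any("exceptional" in reason.lower() for reason in reasons):
--         return "Fast-track for senior review and immediate interview scheduling"
--     elif any("red flag" in reason.lower() for reason in reasons):
--         return "Detailed manual review required before proceeding"
--     elif any("borderline" in reason.lower() for reason in reasons):
--         return "Human recruiter review to make final decision"
--     else:
--         return "Additional review recommended"
-- ===== SOURCE B (Python) =====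
-- from typing import List
--
-- _ACTIONS = [
--     "Additional review recommended",
--     "Human recruiter review to make final decision",
--     "Detailed manual review required before proceeding",
--     "Fast-track for senior review and immediate interview scheduling",
-- ]
--
-- def _severity(reason: str) -> int:
--     rl = reason.lower()
--     if "exceptional" in rl:
--         return 3
--     if "red flag" in rl:
--         return 2
--     if "borderline" in rl:
--         return 1
--     return 0
--
-- def _recommend_escalation_action(reasons: List[str]) -> str:
--     """Recommend action for escalated case (max-severity + table lookup)"""
--     sev = 0
--     for r in reasons:
--         sev = max(sev, _severity(r))
--     return _ACTIONS[sev]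
-- ===== Notes on version B (the rewrite author's own statement) =====
-- stated objective: alternative
-- what changed: Replaces the four staged short-circuiting any() keyword scans with a map-reduce: each reason is mapped to a numeric severity rank, the ranks are reduced with max in one pass, and the answer is a table lookup indexed by the maximum severity.
import Mathlib
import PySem

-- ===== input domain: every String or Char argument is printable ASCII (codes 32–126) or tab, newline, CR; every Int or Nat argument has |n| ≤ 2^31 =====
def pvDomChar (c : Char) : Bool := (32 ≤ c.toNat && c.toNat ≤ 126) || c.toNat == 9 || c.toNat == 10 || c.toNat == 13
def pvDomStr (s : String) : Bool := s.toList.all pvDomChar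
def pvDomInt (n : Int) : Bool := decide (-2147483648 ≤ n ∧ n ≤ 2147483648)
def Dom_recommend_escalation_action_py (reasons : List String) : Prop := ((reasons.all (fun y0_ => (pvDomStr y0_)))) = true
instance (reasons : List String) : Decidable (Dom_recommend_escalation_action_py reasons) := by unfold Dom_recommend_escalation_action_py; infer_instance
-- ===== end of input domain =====

-- ===== PORT A =====
def recommend_escalation_action_py (reasons : List String) : String :=
  if reasons.any (fun reason => PySem.Str.isIn "exceptional" (PySem.Str.lower reason)) then
    "Fast-track for senior review and immediate interview scheduling"
  else if reasons.any (fun reason => PySem.Str.isIn "red flag" (PySem.Str.lower reason)) then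
    "Detailed manual review required before proceeding"
  else if reasons.any (fun reason => PySem.Str.isIn "borderline" (PySem.Str.lower reason)) then
    "Human recruiter review to make final decision"
  else
    "Additional review recommended"

-- ===== PORT B =====
-- map each reason to a severity rank, reduce with max, look the action up in a table
def pvActions : List String :=
  ["Additional review recommended",
   "Human recruiter review to make final decision",
   "Detailed manual review required before proceeding",
   "Fast-track for senior review and immediate interview scheduling"]

def pvSeverity (reason : String) : Nat :=
  let rl := PySem.Str.lower reason
  if PySem.Str.isIn "exceptional" rl then 3
  else if PySem.Str.isIn "red flag" rl then 2
  else if PySem.Str.isIn "borderline" rl then 1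
  else 0

def recommend_escalation_action_py_alt (reasons : List String) : String :=
  pvActions.getD (reasons.foldl (fun sev r => max sev (pvSeverity r)) 0) ""

-- ===== PRECONDITION & SPEC =====
def Spec_recommend_escalation_action_py (reasons : List String) (out : String) : Prop := out = recommend_escalation_action_py_alt reasons
instance (reasons : List String) (out : String) : Decidable (Spec_recommend_escalation_action_py reasons out) := by unfold Spec_recommend_escalation_action_py; infer_instance

-- ===== CLAIM (what is proved, stated in full; the proofs are below) =====
def Claim_equal_recommend_escalation_action_py : Prop := ∀ (reasons : List String), Dom_recommend_escalation_action_py reasons → Spec_recommend_escalation_action_py reasons (recommend_escalation_action_py reasons)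

-- ===== LEMMAS AND PROOFS =====

-- the maximum severity, expressed by A's staged scans
def pvMaxSev (reasons : List String) : Nat :=
  if reasons.any (fun reason => PySem.Str.isIn "exceptional" (PySem.Str.lower reason)) then 3
  else if reasons.any (fun reason => PySem.Str.isIn "red flag" (PySem.Str.lower reason)) then 2
  else if reasons.any (fun reason => PySem.Str.isIn "borderline" (PySem.Str.lower reason)) then 1
  else 0

lemma max_sev_bool (b1 b2 b3 a1 a2 a3 : Bool) :
    max (if b1 then 3 else if b2 then 2 else if b3 then 1 else 0)
        (if a1 then 3 else if a2 then 2 else if a3 then 1 else 0) =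
      (if b1 || a1 then 3 else if b2 || a2 then 2 else if b3 || a3 then (1 : Nat) else 0) := by
  cases b1 <;> cases b2 <;> cases b3 <;> cases a1 <;> cases a2 <;> cases a3 <;> decide

lemma sev_cons (h : String) (t : List String) :
    max (pvSeverity h) (pvMaxSev t) = pvMaxSev (h :: t) := by
  unfold pvSeverity pvMaxSev
  simp only [List.any_cons]
  exact max_sev_bool _ _ _ _ _ _

lemma foldl_max_sev (reasons : List String) (a : Nat) :
    reasons.foldl (fun sev r => max sev (pvSeverity r)) a = max a (pvMaxSev reasons) := by
  induction reasons generalizing a with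
  | nil => simp [pvMaxSev]
  | cons h t ih =>
      rw [List.foldl_cons, ih, ← sev_cons, Nat.max_assoc]

-- ===== VERDICT (by name: the statement is the Claim_ definition above) =====
theorem recommend_escalation_action_py_spec : Claim_equal_recommend_escalation_action_py := by
  intro reasons _
  unfold Spec_recommend_escalation_action_py recommend_escalation_action_py
    recommend_escalation_action_py_alt
  rw [foldl_max_sev, Nat.zero_max]
  unfold pvMaxSev
  split_ifs <;> rfl
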